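-- pv_equiv track=rewrite | github.com/FilfTeen/beyond-dev-ai-kit | prompt-dsl-system/tools/followup_patch_generator.py | replace_with_boundaries
-- ===== SOURCE A (Python) =====
-- from typing import Any, Dict, List, Optional, Sequence, Tuple
--
-- BOUNDARY_CHARS = set(" \t\r\n\"'`()[]{}<>,;:=|")
--
-- def replace_with_boundaries(text: str, old: str, new: str, limit: int) -> Tuple[str, int]:
--     if not old or limit <= 0:
--         return text, 0
--     result: List[str] = []
--     idx = 0
--     replaced = 0
--     n = len(old)
--     while idx < len(text):
--         pos = text.find(old, idx)
--         if pos < 0 or replaced >= limit: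
--             result.append(text[idx:])
--             break
--         end = pos + n
--         before_ok = pos == 0 or text[pos - 1] in BOUNDARY_CHARS
--         after_ok = end == len(text) or text[end] in BOUNDARY_CHARS
--         if before_ok and after_ok:
--             result.append(text[idx:pos])
--             result.append(new)
--             idx = end
--             replaced += 1
--         else:
--             result.append(text[idx : pos + 1])
--             idx = pos + 1
--     else:
--         result.append("")
--     return "".join(result), replaced
-- ===== SOURCE B (Python) =====
-- BOUNDARY_CHARS = set(" \t\r\n\"'`()[]{}<>,;:=|")
--
-- def _boundary_ok(text, pos, end):
--     before = pos == 0 or text[pos - 1] in BOUNDARY_CHARS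
--     after = end == len(text) or text[end] in BOUNDARY_CHARS
--     return before and after
--
-- def replace_with_boundaries(text, old, new, limit):
--     if not old or limit <= 0:
--         return text, 0
--     # pass 1: collect the accepted match spans
--     spans = []
--     idx = 0
--     n = len(old)
--     while idx < len(text):
--         if len(spans) >= limit:
--             break
--         pos = text.find(old, idx)
--         if pos < 0:
--             break
--         end = pos + n
--         if _boundary_ok(text, pos, end):
--             spans.append((pos, end))
--             idx = end
--         else:
--             idx = pos + 1
--     # pass 2: stitch the result from the spans
--     parts = []
--     last = 0
--     for start, end in spans:
--         parts.append(text[last:start])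
--         parts.append(new)
--         last = end
--     parts.append(text[last:])
--     return "".join(parts), len(spans)
-- ===== Notes on version B (the rewrite author's own statement) =====
-- stated objective: alternative
-- what changed: B separates A's single interleaved loop into two passes: a scan that only collects the accepted (start, end) match spans, then a stitching pass that assembles the output from the span list; the count is the span list's length instead of a running counter.
import Mathlib
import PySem

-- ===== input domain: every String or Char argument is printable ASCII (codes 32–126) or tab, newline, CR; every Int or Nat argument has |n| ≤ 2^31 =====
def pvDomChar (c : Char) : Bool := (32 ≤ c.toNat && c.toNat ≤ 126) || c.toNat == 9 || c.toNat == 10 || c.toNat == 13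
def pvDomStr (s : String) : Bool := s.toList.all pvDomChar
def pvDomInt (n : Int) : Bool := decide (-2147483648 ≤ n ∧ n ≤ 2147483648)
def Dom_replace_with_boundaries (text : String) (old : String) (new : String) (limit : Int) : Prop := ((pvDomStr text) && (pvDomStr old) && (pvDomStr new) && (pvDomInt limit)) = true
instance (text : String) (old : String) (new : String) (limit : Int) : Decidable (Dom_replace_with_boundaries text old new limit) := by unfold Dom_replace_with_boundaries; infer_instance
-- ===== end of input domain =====

-- B does the replacement in two passes (collect accepted match spans, then stitch the
-- result) instead of A's single loop that interleaves scanning with output building;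
-- objective: alternative decomposition, same cost.

-- ===== PORT A =====
-- the module constant BOUNDARY_CHARS = set(" \t\r\n\"'`()[]{}<>,;:=|")
def pvBOUNDARY : PySem.Set Char := PySem.Set.ofList " \t\r\n\"'`()[]{}<>,;:=|".toList

-- A's while loop; fuel only makes the recursion total (idx strictly increases on real
-- runs, so fuel = len(text)+1 is never exhausted; the fuel-0 value is the loop's break value)
def pvALoop (text old new : List Char) (limit : Int) :
    (fuel : Nat) → (idx : Nat) → (replaced : Int) → (acc : List Char) → List Char × Int
  | 0, idx, replaced, acc => (acc ++ text.drop idx, replaced)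
  | fuel + 1, idx, replaced, acc =>
    if idx < text.length then
      let pos := PySem.Chars.findFrom text old (idx : Int) none
      if pos < 0 ∨ replaced ≥ limit then (acc ++ text.drop idx, replaced)
      else
        let p := pos.toNat
        let en := p + old.length
        let before_ok := p == 0 || PySem.Set.contains pvBOUNDARY (text.getD (p - 1) ' ')
        let after_ok := en == text.length || PySem.Set.contains pvBOUNDARY (text.getD en ' ')
        if before_ok && after_ok then
          pvALoop text old new limit fuel en (replaced + 1)
            (acc ++ (text.drop idx).take (p - idx) ++ new)
        else
          pvALoop text old new limit fuel (p + 1) replaced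
            (acc ++ (text.drop idx).take (p + 1 - idx))
    else (acc ++ [], replaced)

def replace_with_boundaries (text : String) (old : String) (new : String) (limit : Int) : String × Int :=
  if old.isEmpty || limit ≤ 0 then (text, 0)
  else
    let t := text.toList
    let r := pvALoop t old.toList new.toList limit (t.length + 1) 0 0 []
    (String.ofList r.1, r.2)

-- ===== PORT B =====
-- Source B's _boundary_ok helper
def pvOkAt (text : List Char) (n p : Nat) : Bool :=
  (p == 0 || PySem.Set.contains pvBOUNDARY (text.getD (p - 1) ' ')) &&
  (p + n == text.length || PySem.Set.contains pvBOUNDARY (text.getD (p + n) ' '))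

-- pass 1: collect the accepted match spans (cnt = len(spans) so far; fuel as in pvALoop)
def pvScan (text old : List Char) (limit : Int) :
    (fuel : Nat) → (idx : Nat) → (cnt : Int) → List (Nat × Nat)
  | 0, _, _ => []
  | fuel + 1, idx, cnt =>
    if idx < text.length then
      if cnt ≥ limit then []
      else
        let pos := PySem.Chars.findFrom text old (idx : Int) none
        if pos < 0 then []
        else
          let p := pos.toNat
          let en := p + old.length
          if pvOkAt text old.length p then
            (p, en) :: pvScan text old limit fuel en (cnt + 1)
          else pvScan text old limit fuel (p + 1) cnt
    else []

-- pass 2: stitch text[last:start] ++ new over the spans, then the tail text[last:]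
def pvBuild (text new : List Char) : List (Nat × Nat) → Nat → List Char
  | [], last => text.drop last
  | (p, en) :: rest, last =>
    (text.drop last).take (p - last) ++ new ++ pvBuild text new rest en

def replace_with_boundaries_alt (text : String) (old : String) (new : String) (limit : Int) : String × Int :=
  if old.isEmpty || limit ≤ 0 then (text, 0)
  else
    let t := text.toList
    let spans := pvScan t old.toList limit (t.length + 1) 0 0
    (String.ofList (pvBuild t new.toList spans 0), (spans.length : Int))

-- ===== PRECONDITION & SPEC =====
def Spec_replace_with_boundaries (text : String) (old : String) (new : String) (limit : Int) (out : String × Int) : Prop := out = replace_with_boundaries_alt text old new limit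
instance (text : String) (old : String) (new : String) (limit : Int) (out : String × Int) : Decidable (Spec_replace_with_boundaries text old new limit out) := by unfold Spec_replace_with_boundaries; infer_instance

-- ===== CLAIM (what is proved, stated in full; the proofs are below) =====
def Claim_equal_replace_with_boundaries : Prop := ∀ (text : String) (old : String) (new : String) (limit : Int), Dom_replace_with_boundaries text old new limit → Spec_replace_with_boundaries text old new limit (replace_with_boundaries text old new limit)

-- ===== LEMMAS AND PROOFS =====

-- every span collected by pvScan starts at or after the scan's start index
theorem pvScan_start_ge (text old : List Char) (limit : Int) :
    ∀ fuel idx cnt, ∀ se ∈ pvScan text old limit fuel idx cnt, idx ≤ se.1 := by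
  intro fuel
  induction fuel with
  | zero => intro idx cnt se h; simp [pvScan] at h
  | succ fuel ih =>
    intro idx cnt se h
    rw [pvScan] at h
    by_cases hlt : idx < text.length
    · simp only [if_pos hlt] at h
      by_cases hcnt : cnt ≥ limit
      · simp [if_pos hcnt] at h
      · simp only [if_neg hcnt] at h
        by_cases hneg : PySem.Chars.findFrom text old (idx : Int) none < 0
        · simp [if_pos hneg] at h
        · simp only [if_neg hneg] at h
          have hk : idx ≤ text.length := le_of_lt hlt
          have hspec := PySem.Chars.findFrom_natCast_spec text old idx hk (by omega)
          have hip : idx ≤ (PySem.Chars.findFrom text old (idx : Int) none).toNat := by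
            have := hspec.1; omega
          by_cases hok : pvOkAt text old.length (PySem.Chars.findFrom text old (idx : Int) none).toNat
          · simp only [if_pos hok, List.mem_cons] at h
            rcases h with h | h
            · subst h; exact hip
            · have := ih _ _ _ h; omega
          · simp only [if_neg hok] at h
            have := ih _ _ _ h; omega
    · simp [if_neg hlt] at h

-- splitting one skipped chunk off the front of a build
theorem pvBuild_split (text new : List Char) (spans : List (Nat × Nat)) (idx m : Nat)
    (him : idx ≤ m) (hs : ∀ se ∈ spans, m ≤ se.1) :
    (text.drop idx).take (m - idx) ++ pvBuild text new spans m = pvBuild text new spans idx := by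
  cases spans with
  | nil =>
    simp only [pvBuild]
    have hdd : text.drop m = (text.drop idx).drop (m - idx) := by
      rw [List.drop_drop]; congr 1; omega
    rw [hdd, List.take_append_drop]
  | cons se rest =>
    obtain ⟨p, en⟩ := se
    have hmp : m ≤ p := hs (p, en) (List.mem_cons_self ..)
    simp only [pvBuild]
    have hdd : text.drop m = (text.drop idx).drop (m - idx) := by
      rw [List.drop_drop]; congr 1; omega
    rw [hdd, ← List.append_assoc, ← List.append_assoc, ← List.take_add]
    congr 3
    omega

-- the key invariant: A's loop equals "build what pvScan collects, appended to acc"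
theorem pvKey (text old new : List Char) (limit : Int) :
    ∀ fuel idx replaced acc,
      pvALoop text old new limit fuel idx replaced acc
        = (acc ++ pvBuild text new (pvScan text old limit fuel idx replaced) idx,
           replaced + ((pvScan text old limit fuel idx replaced).length : Int)) := by
  intro fuel
  induction fuel with
  | zero => intro idx replaced acc; simp [pvALoop, pvScan, pvBuild]
  | succ fuel ih =>
    intro idx replaced acc
    rw [pvALoop, pvScan]
    by_cases hlt : idx < text.length
    · simp only [if_pos hlt]
      by_cases hneg : PySem.Chars.findFrom text old (idx : Int) none < 0
      · have hcond : PySem.Chars.findFrom text old (idx : Int) none < 0 ∨ replaced ≥ limit :=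
          Or.inl hneg
        simp only [if_pos hcond]
        by_cases hcnt : replaced ≥ limit
        · simp [if_pos hcnt, pvBuild]
        · simp [if_pos hneg, pvBuild]
      · by_cases hcnt : replaced ≥ limit
        · simp [if_pos (Or.inr hcnt : _ ∨ replaced ≥ limit), if_pos hcnt, pvBuild]
        · have hcond : ¬ (PySem.Chars.findFrom text old (idx : Int) none < 0 ∨ replaced ≥ limit) := by
            exact fun h => h.elim hneg hcnt
          simp only [if_neg hcond, if_neg hcnt, if_neg hneg]
          have hk : idx ≤ text.length := le_of_lt hlt
          have hspec := PySem.Chars.findFrom_natCast_spec text old idx hk (by omega)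
          have hip : idx ≤ (PySem.Chars.findFrom text old (idx : Int) none).toNat := by
            have := hspec.1; omega
          set p := (PySem.Chars.findFrom text old (idx : Int) none).toNat with hp
          by_cases hok : ((p == 0 || PySem.Set.contains pvBOUNDARY (text.getD (p - 1) ' '))
              && (p + old.length == text.length
                  || PySem.Set.contains pvBOUNDARY (text.getD (p + old.length) ' '))) = true
          · have hok2 : pvOkAt text old.length p = true := hok
            simp only [if_pos hok, if_pos hok2, ih]
            simp only [pvBuild, List.length_cons, Prod.mk.injEq]
            refine ⟨by simp [List.append_assoc], by push_cast; ring⟩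
          · have hok2 : ¬ pvOkAt text old.length p = true := hok
            simp only [if_neg hok, if_neg hok2, ih]
            have hge : ∀ se ∈ pvScan text old limit fuel (p + 1) replaced, p + 1 ≤ se.1 :=
              pvScan_start_ge text old limit fuel (p + 1) replaced
            rw [List.append_assoc,
              pvBuild_split text new _ idx (p + 1) (by omega) hge]
    · simp [if_neg hlt, pvBuild, List.drop_eq_nil_of_le (Nat.le_of_not_lt hlt)]

-- ===== VERDICT (by name: the statement is the Claim_ definition above) =====
theorem replace_with_boundaries_spec : Claim_equal_replace_with_boundaries := by
  intro text old new limit _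
  unfold Spec_replace_with_boundaries replace_with_boundaries replace_with_boundaries_alt
  by_cases h : old.isEmpty || limit ≤ 0
  · simp [h]
  · simp only [h, Bool.false_eq_true, if_false]
    rw [pvKey]
    simp
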